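-- pv_equiv track=rewrite | github.com/zjma/stepmania-scripts | convert.py | join_bars
-- ===== SOURCE A (Python) =====
-- def join_bars(bars):
--     ret = []
--     for i,bar in enumerate(bars):
--         ret+=bar
--         if i<len(bars)-1:
--             ret+=[',']
--         else:
--             ret+=[';']
--     ret+=['']
--     return ret
-- ===== SOURCE B (Python) =====
-- def join_bars(bars):
--     return _join(bars) + ['']
--
-- def _join(bs):
--     if not bs:
--         return []
--     head = list(bs[0])
--     if len(bs) == 1:
--         return head + [';']
--     return head + [','] + _join(bs[1:])
-- ===== Notes on version B (the rewrite author's own statement) =====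
-- stated objective: alternative
-- what changed: B replaces A's indexed loop (enumerate + comparing i with len(bars)-1 to pick ',' vs ';') by a structural recursion on the list: the base/singleton/cons cases decide the separator from the remaining shape, with no indices, lengths-minus-one or accumulator loop.
import Mathlib
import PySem

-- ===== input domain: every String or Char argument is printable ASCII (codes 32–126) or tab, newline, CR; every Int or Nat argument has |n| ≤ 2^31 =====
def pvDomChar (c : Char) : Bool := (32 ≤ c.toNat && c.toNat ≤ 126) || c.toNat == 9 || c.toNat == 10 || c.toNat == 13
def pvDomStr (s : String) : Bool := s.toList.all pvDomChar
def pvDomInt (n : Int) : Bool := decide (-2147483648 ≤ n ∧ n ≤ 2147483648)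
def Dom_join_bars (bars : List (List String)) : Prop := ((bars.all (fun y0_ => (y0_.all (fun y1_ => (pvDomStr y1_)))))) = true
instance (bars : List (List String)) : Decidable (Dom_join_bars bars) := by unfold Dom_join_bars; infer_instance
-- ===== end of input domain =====

-- B replaces A's indexed loop with a structural recursion on the list; objective: alternative decomposition.

-- ===== PORT A =====
-- for i,bar in enumerate(bars): ret+=bar; if i<len(bars)-1: ret+=[','] else: ret+=[';']  then ret+=['']
def join_bars (bars : List (List String)) : List String :=
  ((PySem.List.enumerate bars 0).foldl
    (fun ret p => (ret ++ p.2) ++ (if p.1 < (bars.length : Int) - 1 then [","] else [";"]))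
    []) ++ [""]

-- ===== PORT B =====
-- _join: empty -> []; singleton -> head+[';']; cons -> head+[',']+_join(rest)
def joinAux : List (List String) → List String
  | [] => []
  | [x] => x ++ [";"]
  | x :: y :: xs => x ++ [","] ++ joinAux (y :: xs)

-- join_bars(bars) = _join(bars) + ['']
def join_bars_alt (bars : List (List String)) : List String :=
  joinAux bars ++ [""]

-- ===== PRECONDITION & SPEC =====
def Spec_join_bars (bars : List (List String)) (out : List String) : Prop := out = join_bars_alt bars
instance (bars : List (List String)) (out : List String) : Decidable (Spec_join_bars bars out) := by unfold Spec_join_bars; infer_instance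

-- ===== CLAIM =====
def Claim_equal_join_bars : Prop := ∀ (bars : List (List String)), Dom_join_bars bars → Spec_join_bars bars (join_bars bars)

-- ===== LEMMAS AND PROOFS =====
lemma loopA (n : Int) : ∀ (l : List (List String)) (s : Int) (acc : List String),
    s + l.length = n →
    (PySem.List.enumerate l s).foldl
      (fun ret p => (ret ++ p.2) ++ (if p.1 < n - 1 then [","] else [";"])) acc
    = acc ++ joinAux l := by
  intro l
  induction l with
  | nil => intro s acc _; simp [PySem.List.enumerate_nil, joinAux]
  | cons x xs ih =>
    intro s acc h
    rw [PySem.List.enumerate_cons]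
    cases xs with
    | nil =>
      simp only [List.length_cons, List.length_nil] at h
      have hs : ¬ s < n - 1 := by omega
      simp [PySem.List.enumerate_nil, joinAux, hs]
    | cons y ys =>
      have hs : s < n - 1 := by
        simp only [List.length_cons] at h
        push_cast at h
        omega
      have h' : (s + 1) + ((y :: ys).length : Int) = n := by
        simp only [List.length_cons] at h ⊢
        push_cast at h ⊢
        omega
      simp only [List.foldl_cons, if_pos hs]
      rw [ih (s + 1) _ h']
      simp [joinAux]

-- ===== VERDICT =====
theorem join_bars_spec : Claim_equal_join_bars := by
  intro bars _
  unfold Spec_join_bars join_bars join_bars_alt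
  rw [loopA ((bars).length : Int) bars 0 [] (by simp)]
  simp
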